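-- pv_equiv track=rewrite | github.com/weiiilunnnn/financial-prospectus-insights | app/chunk.py | _char_offsets_for_pages
-- ===== SOURCE A (Python) =====
-- from typing import List, Dict, Tuple
--
-- def _char_offsets_for_pages(pages: List[str], sep: str = "\n\n") -> Tuple[str, List[int]]:
--     offsets = []
--     curr = 0
--     for p in pages:
--         offsets.append(curr)
--         curr += len(p) + len(sep)
--     combined_text = sep.join(pages)
--     return combined_text, offsets
-- ===== SOURCE B (Python) =====
-- def _char_offsets_for_pages(pages, sep="\n\n"):
--     # Walk the pages BACKWARDS from the total advanced length, subtracting each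
--     # page's advance; reverse at the end to get the start offsets in order.
--     curr = sum(len(p) for p in pages) + len(pages) * len(sep)
--     offsets = []
--     for p in reversed(pages):
--         curr -= len(p) + len(sep)
--         offsets.append(curr)
--     offsets.reverse()
--     return sep.join(pages), offsets
-- ===== Notes on version B (the rewrite author's own statement) =====
-- stated objective: alternative
-- what changed: B computes the total advanced length first and derives the start offsets by walking the pages in reverse, subtracting each page's advance, then reversing the result, instead of A's single forward accumulator loop.
import Mathlib
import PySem

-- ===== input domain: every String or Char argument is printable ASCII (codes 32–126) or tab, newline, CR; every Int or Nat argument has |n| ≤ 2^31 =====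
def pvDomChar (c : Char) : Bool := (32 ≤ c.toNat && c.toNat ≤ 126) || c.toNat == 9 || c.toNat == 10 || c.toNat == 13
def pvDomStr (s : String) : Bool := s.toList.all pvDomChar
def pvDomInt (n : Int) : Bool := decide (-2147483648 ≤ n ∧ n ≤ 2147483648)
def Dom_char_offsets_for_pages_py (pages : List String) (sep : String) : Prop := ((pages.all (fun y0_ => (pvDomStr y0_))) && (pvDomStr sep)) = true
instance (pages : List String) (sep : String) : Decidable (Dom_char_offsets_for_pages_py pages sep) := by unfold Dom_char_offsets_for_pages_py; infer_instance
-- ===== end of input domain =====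

-- B derives the start offsets by a backwards walk from the total advanced length instead of A's forward accumulator loop (alternative decomposition, same cost).


-- ===== PORT A =====
-- forward loop: append curr, then advance by len(p) + len(sep)
def char_offsets_for_pages_py (pages : List String) (sep : String) : String × List Int :=
  let st := pages.foldl
    (fun (st : List Int × Int) p => (st.1 ++ [st.2], st.2 + (PySem.Str.len p : Int) + (PySem.Str.len sep : Int)))
    ([], 0)
  (PySem.Str.join sep pages, st.1)

-- ===== PORT B =====
-- total advanced length, then backwards walk subtracting each page's advance, then reverse
def char_offsets_for_pages_py_alt (pages : List String) (sep : String) : String × List Int :=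
  let curr0 : Int := (pages.map (fun p => (PySem.Str.len p : Int))).sum + (pages.length : Int) * (PySem.Str.len sep : Int)
  let st := pages.reverse.foldl
    (fun (st : List Int × Int) p =>
      let c := st.2 - ((PySem.Str.len p : Int) + (PySem.Str.len sep : Int))
      (st.1 ++ [c], c))
    ([], curr0)
  (PySem.Str.join sep pages, st.1.reverse)

-- ===== PRECONDITION & SPEC =====
def Spec_char_offsets_for_pages_py (pages : List String) (sep : String) (out : String × List Int) : Prop := out = char_offsets_for_pages_py_alt pages sep
instance (pages : List String) (sep : String) (out : String × List Int) : Decidable (Spec_char_offsets_for_pages_py pages sep out) := by unfold Spec_char_offsets_for_pages_py; infer_instance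

-- ===== CLAIM (what is proved, stated in full; the proofs are below) =====
def Claim_equal_char_offsets_for_pages_py : Prop := ∀ (pages : List String) (sep : String), Dom_char_offsets_for_pages_py pages sep → Spec_char_offsets_for_pages_py pages sep (char_offsets_for_pages_py pages sep)

-- ===== LEMMAS AND PROOFS =====

-- per-page advance
def pvStep (sep p : String) : Int := (PySem.Str.len p : Int) + (PySem.Str.len sep : Int)

-- reference forward offsets list
def pvFwd (sep : String) : List String → Int → List Int
  | [], _ => []
  | p :: r, c => c :: pvFwd sep r (c + pvStep sep p)

-- A's loop computes (acc ++ pvFwd, final counter)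
theorem pvA_loop (sep : String) (l : List String) (acc : List Int) (c : Int) :
    l.foldl (fun (st : List Int × Int) p => (st.1 ++ [st.2], st.2 + (PySem.Str.len p : Int) + (PySem.Str.len sep : Int))) (acc, c)
      = (acc ++ pvFwd sep l c, c + (l.map (pvStep sep)).sum) := by
  induction l generalizing acc c with
  | nil => simp [pvFwd]
  | cons p r ih =>
    rw [List.foldl_cons, ih]
    simp [pvFwd, pvStep, add_assoc]

-- backwards offsets list (B's loop body, before final reverse)
def pvBwd (sep : String) : List String → Int → List Int
  | [], _ => []
  | p :: r, c => (c - pvStep sep p) :: pvBwd sep r (c - pvStep sep p)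

theorem pvB_loop (sep : String) (l : List String) (acc : List Int) (c : Int) :
    l.foldl (fun (st : List Int × Int) p =>
        let d := st.2 - ((PySem.Str.len p : Int) + (PySem.Str.len sep : Int))
        (st.1 ++ [d], d)) (acc, c)
      = (acc ++ pvBwd sep l c, c - (l.map (pvStep sep)).sum) := by
  induction l generalizing acc c with
  | nil => simp [pvBwd]
  | cons p r ih =>
    rw [List.foldl_cons, ih]
    simp [pvBwd, pvStep, sub_sub]

theorem pvBwd_append (sep : String) (xs ys : List String) (c : Int) :
    pvBwd sep (xs ++ ys) c = pvBwd sep xs c ++ pvBwd sep ys (c - (xs.map (pvStep sep)).sum) := by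
  induction xs generalizing c with
  | nil => simp [pvBwd]
  | cons p r ih => simp [pvBwd, ih]; ring_nf

theorem pvBwd_reverse (sep : String) (l : List String) (c : Int) :
    (pvBwd sep l.reverse (c + (l.map (pvStep sep)).sum)).reverse = pvFwd sep l c := by
  induction l generalizing c with
  | nil => simp [pvBwd, pvFwd]
  | cons p r ih =>
    have hs : (r.reverse.map (pvStep sep)).sum = (r.map (pvStep sep)).sum := by
      simp
    simp only [List.reverse_cons, pvBwd_append, pvFwd, List.map_cons, List.sum_cons, hs]
    have : c + (pvStep sep p + (r.map (pvStep sep)).sum) - (r.map (pvStep sep)).sum = c + pvStep sep p := by ring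
    simp [pvBwd, this]
    have := ih (c + pvStep sep p)
    rw [show c + pvStep sep p + (r.map (pvStep sep)).sum = c + (pvStep sep p + (r.map (pvStep sep)).sum) by ring] at this
    exact this

theorem pvTotal (sep : String) (l : List String) :
    (l.map (fun p => (PySem.Str.len p : Int))).sum + (l.length : Int) * (PySem.Str.len sep : Int)
      = (l.map (pvStep sep)).sum := by
  induction l with
  | nil => simp
  | cons p r ih => simp [pvStep, ← ih]; ring

-- ===== VERDICT (by name: the statement is the Claim_ definition above) =====
theorem char_offsets_for_pages_py_spec : Claim_equal_char_offsets_for_pages_py := by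
  intro pages sep _
  unfold Spec_char_offsets_for_pages_py char_offsets_for_pages_py char_offsets_for_pages_py_alt
  simp only [pvA_loop, pvB_loop, pvTotal, List.nil_append]
  rw [show (pages.map (pvStep sep)).sum = 0 + (pages.map (pvStep sep)).sum by ring]
  rw [pvBwd_reverse]
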